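-- pv_equiv track=rewrite | github.com/YofaGh/MangaScraper | modules/Manhwa18.py | rename_chapter
-- ===== SOURCE A (Python) =====
-- def rename_chapter(chapter):
--     new_name = ""
--     reached_number = False
--     for ch in chapter:
--         if ch.isdigit():
--             new_name += ch
--             reached_number = True
--         elif ch in "-." and reached_number and new_name[-1] != ".":
--             new_name += "."
--     if not reached_number:
--         return chapter
--     new_name = new_name.rstrip(".").rsplit(".", 1)[0]
--     try:
--         return f"Chapter {int(new_name):03d}"
--     except ValueError:
--         return f"Chapter {new_name.split('.', 1)[0].zfill(3)}.{new_name.split('.', 1)[1]}"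
-- ===== SOURCE B (Python) =====
-- def rename_chapter(chapter):
--     # Staged declarative pipeline instead of A's stateful character loop:
--     # keep only digits and separators, normalise separators to '.', then keep a
--     # char iff it is a digit or directly follows a digit (stateless neighbour test),
--     # which both strips leading separators and collapses separator runs.
--     if not any(c.isdigit() for c in chapter):
--         return chapter
--     s = "".join("." if c in "-." else c for c in chapter if c.isdigit() or c in "-.")
--     new_name = "".join(c for p, c in zip(" " + s, s) if c.isdigit() or p.isdigit())
--     new_name = new_name.rstrip(".").rsplit(".", 1)[0]
--     try:
--         return f"Chapter {int(new_name):03d}"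
--     except ValueError:
--         return f"Chapter {new_name.split('.', 1)[0].zfill(3)}.{new_name.split('.', 1)[1]}"
-- ===== Notes on version B (the rewrite author's own statement) =====
-- stated objective: alternative
-- what changed: B replaces A's stateful character loop (which inspects its own output's last character and a reached-number flag) by a staged declarative pipeline: filter to digits and separators, normalise both separators to the dot form, then a stateless neighbour test (keep a char iff it is a digit or directly follows a digit) that strips leading separators and collapses separator runs, followed by the same formatting tail.
import Mathlib
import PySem

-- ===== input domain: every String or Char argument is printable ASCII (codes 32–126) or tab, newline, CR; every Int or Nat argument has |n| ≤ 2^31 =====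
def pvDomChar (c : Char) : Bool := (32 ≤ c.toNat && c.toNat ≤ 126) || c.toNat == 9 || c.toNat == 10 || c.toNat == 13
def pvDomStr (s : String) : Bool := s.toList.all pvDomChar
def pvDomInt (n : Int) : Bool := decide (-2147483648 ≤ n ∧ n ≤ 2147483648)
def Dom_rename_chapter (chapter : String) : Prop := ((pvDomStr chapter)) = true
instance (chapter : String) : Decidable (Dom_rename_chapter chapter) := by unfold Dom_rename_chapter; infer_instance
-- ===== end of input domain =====

-- B replaces A's stateful character loop by a staged declarative pipeline (filter/normalise,
-- then a stateless keep-iff-digit-or-follows-a-digit neighbour test); same value everywhere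
-- (objective: alternative).

-- ===== PORT A =====
-- one loop iteration of A: append digits; 'ch in "-."' ported as the two-char disjunction,
-- new_name[-1] via pyGet? (the 'reached_number' conjunct guarantees new_name is nonempty)
def stepA (st : List Char × Bool) (ch : Char) : List Char × Bool :=
  if PySem.Chars.isdigit ch then (st.1 ++ [ch], true)
  else if (ch == '-' || ch == '.') && st.2 && (PySem.List.pyGet? st.1 (-1) != some '.') then
    (st.1 ++ ['.'], st.2)
  else st

def rename_chapter (chapter : String) : String :=
  let st := chapter.toList.foldl stepA ([], false)
  if st.2 then
    -- new_name.rstrip(".") : hand port (exact: removes the trailing run of '.')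
    let nn1 := (st.1.reverse.dropWhile (· == '.')).reverse
    -- new_name.rsplit(".", 1)[0] : hand port (exact: everything before the last '.', or the whole string)
    let nn2 := if nn1.contains '.' then ((nn1.reverse.dropWhile (fun c => c != '.')).drop 1).reverse else nn1
    match PySem.Int.ofChars? nn2 with      -- try: int(new_name)  (none = ValueError)
    | some n => String.ofList ("Chapter ".toList ++ PySem.Chars.zfill (PySem.Int.toChars n) 3)  -- f"{…:03d}"
    | none =>
      let sp := PySem.Chars.splitOnMax nn2 ['.'] 1   -- new_name.split(".", 1)
      -- index 1 exists here: this branch is reached only when new_name contains '.'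
      String.ofList ("Chapter ".toList ++ PySem.Chars.zfill (sp.getD 0 []) 3 ++ '.' :: sp.getD 1 [])
  else chapter

-- ===== PORT B =====
-- s = "".join("." if c in "-." else c for c in chapter if c.isdigit() or c in "-.")
def normB (l : List Char) : List Char :=
  (l.filter (fun c => PySem.Chars.isdigit c || c == '-' || c == '.')).map
    (fun c => if c == '-' || c == '.' then '.' else c)

-- "".join(c for p, c in zip(" " + s, s) if c.isdigit() or p.isdigit())
def keepB (s : List Char) : List Char :=
  ((' ' :: s).zip s).filterMap
    (fun pc => if PySem.Chars.isdigit pc.2 || PySem.Chars.isdigit pc.1 then some pc.2 else none)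

def rename_chapter_alt (chapter : String) : String :=
  if chapter.toList.any PySem.Chars.isdigit then     -- any(c.isdigit() for c in chapter)
    let nn := keepB (normB chapter.toList)
    -- the identical tail: rstrip('.'), rsplit('.',1)[0], int/zfill formatting
    let nn1 := (nn.reverse.dropWhile (· == '.')).reverse
    let nn2 := if nn1.contains '.' then ((nn1.reverse.dropWhile (fun c => c != '.')).drop 1).reverse else nn1
    match PySem.Int.ofChars? nn2 with
    | some n => String.ofList ("Chapter ".toList ++ PySem.Chars.zfill (PySem.Int.toChars n) 3)
    | none =>
      let sp := PySem.Chars.splitOnMax nn2 ['.'] 1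
      String.ofList ("Chapter ".toList ++ PySem.Chars.zfill (sp.getD 0 []) 3 ++ '.' :: sp.getD 1 [])
  else chapter

-- ===== PRECONDITION & SPEC =====
def Spec_rename_chapter (chapter : String) (out : String) : Prop := out = rename_chapter_alt chapter
instance (chapter : String) (out : String) : Decidable (Spec_rename_chapter chapter out) := by unfold Spec_rename_chapter; infer_instance

-- ===== CLAIM (what is proved, stated in full; the proofs are below) =====
def Claim_equal_rename_chapter : Prop := ∀ (chapter : String), Dom_rename_chapter chapter → Spec_rename_chapter chapter (rename_chapter chapter)

-- ===== LEMMAS AND PROOFS =====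

lemma pyGet_neg_one (s : List Char) (h : s ≠ []) : PySem.List.pyGet? s (-1) = s.getLast? := by
  simp only [PySem.List.pyGet?, PySem.List.pyIdx?]
  have hl : 0 < s.length := List.length_pos_iff.mpr h
  have : ¬ ((0:Int) ≤ -1) := by omega
  simp only [this, if_false]
  have : -(s.length:Int) ≤ -1 := by omega
  simp only [this, if_true, Option.bind_some]
  rw [List.getLast?_eq_getElem?]
  norm_num

lemma dot_not_digit : PySem.Chars.isdigit '.' = false := by decide

lemma dash_not_digit : PySem.Chars.isdigit '-' = false := by decide

lemma normB_snoc (l : List Char) (c : Char) :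
    normB (l ++ [c]) =
      normB l ++ (if PySem.Chars.isdigit c then [c]
                  else if c == '-' || c == '.' then ['.'] else []) := by
  by_cases h1 : c = '-'
  · subst h1; simp [normB, List.filter_append, List.filter, dash_not_digit]
  · by_cases h2 : c = '.'
    · subst h2; simp [normB, List.filter_append, List.filter, dot_not_digit]
    · have e1 : (c == '-') = false := beq_eq_false_iff_ne.mpr h1
      have e2 : (c == '.') = false := beq_eq_false_iff_ne.mpr h2
      by_cases hd : PySem.Chars.isdigit c = true
      · simp [normB, List.filter_append, List.filter, hd, e1, e2]
        intro h; rcases h with rfl | rfl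
        · exact absurd rfl h1
        · exact absurd rfl h2
      · simp [normB, List.filter_append, List.filter, hd, e1, e2]

lemma mem_normB (l : List Char) (x : Char) (hx : x ∈ normB l) :
    PySem.Chars.isdigit x = true ∨ x = '.' := by
  simp only [normB, List.mem_map, List.mem_filter] at hx
  obtain ⟨c, ⟨_, hc⟩, rfl⟩ := hx
  by_cases h1 : c = '-'
  · subst h1; right; simp
  · by_cases h2 : c = '.'
    · subst h2; right; simp
    · left
      rw [if_neg (by simp [h1, h2])]
      simp only [beq_iff_eq, Bool.or_eq_true] at hc
      rcases hc with (h | h) | h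
      · exact h
      · exact absurd h h1
      · exact absurd h h2

lemma zip_prev_snoc (s : List Char) (p c : Char) :
    ((p :: (s ++ [c])).zip (s ++ [c])) = ((p :: s).zip s) ++ [(s.getLastD p, c)] := by
  induction s generalizing p with
  | nil => simp
  | cons x t ih =>
    simp only [List.cons_append, List.zip_cons_cons, ih x, List.getLastD_cons]

lemma keepB_snoc (s : List Char) (c : Char) :
    keepB (s ++ [c]) =
      keepB s ++ (if PySem.Chars.isdigit c || PySem.Chars.isdigit (s.getLastD ' ')
                  then [c] else []) := by
  simp only [keepB, zip_prev_snoc, List.filterMap_append]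
  by_cases hc : PySem.Chars.isdigit c = true
  · simp [List.filterMap, hc]
  · by_cases hp : PySem.Chars.isdigit (s.getLastD ' ') = true
    · simp only [List.getLastD_eq_getLast?] at hp
      simp [List.filterMap, hc, hp, List.getLastD_eq_getLast?]
    · simp only [List.getLastD_eq_getLast?] at hp
      simp [List.filterMap, hc, hp, List.getLastD_eq_getLast?]

-- the invariant: A's fold state is (keepB (normB l), "some digit in l"), and when a digit
-- was reached the accumulator is nonempty and ends with '.' exactly when normB l does
def InvA (l : List Char) : Prop :=
  l.foldl stepA ([], false) = (keepB (normB l), (normB l).any PySem.Chars.isdigit) ∧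
  ((normB l).any PySem.Chars.isdigit = true →
    keepB (normB l) ≠ [] ∧
    ((keepB (normB l)).getLast? = some '.' ↔ (normB l).getLast? = some '.'))

lemma normB_any_digit (l : List Char) :
    (normB l).any PySem.Chars.isdigit = l.any PySem.Chars.isdigit := by
  rw [Bool.eq_iff_iff, List.any_eq_true, List.any_eq_true]
  constructor
  · rintro ⟨x, hx, hdx⟩
    simp only [normB, List.mem_map, List.mem_filter] at hx
    obtain ⟨c, ⟨hcl, _⟩, rfl⟩ := hx
    by_cases hs : (c == '-' || c == '.') = true
    · rw [if_pos hs] at hdx; exact absurd hdx (by simp [dot_not_digit])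
    · rw [if_neg (by simp [hs])] at hdx
      exact ⟨c, hcl, hdx⟩
  · rintro ⟨c, hcl, hdc⟩
    have hs : (c == '-' || c == '.') = false := by
      by_cases e1 : c = '-'
      · subst e1; exact absurd hdc (by simp [dash_not_digit])
      · by_cases e2 : c = '.'
        · subst e2; exact absurd hdc (by simp [dot_not_digit])
        · simp [beq_eq_false_iff_ne.mpr e1, beq_eq_false_iff_ne.mpr e2]
    refine ⟨c, ?_, hdc⟩
    simp only [normB, List.mem_map, List.mem_filter]
    exact ⟨c, ⟨hcl, by simp [hdc]⟩, by rw [if_neg (by simp [hs])]⟩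

lemma invA_holds (l : List Char) : InvA l := by
  induction l using List.reverseRecOn with
  | nil => exact ⟨rfl, by intro h; simp [normB] at h⟩
  | append_singleton l c ih =>
    obtain ⟨hfold, hrest⟩ := ih
    unfold InvA
    rw [List.foldl_append, hfold, normB_snoc]
    by_cases hd : PySem.Chars.isdigit c = true
    · -- a digit: appended on both sides
      rw [if_pos hd]
      have hk : keepB (normB l ++ [c]) = keepB (normB l) ++ [c] := by
        rw [keepB_snoc]; simp [hd]
      constructor
      · simp [List.foldl, stepA, hd, hk]
      · intro _
        refine ⟨by simp [hk], ?_⟩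
        rw [hk, List.getLast?_append_of_ne_nil _ (by simp),
          List.getLast?_append_of_ne_nil _ (by simp)]
    · by_cases hs : (c == '-' || c == '.') = true
      · -- a separator, normalised to '.'
        rw [if_neg hd, if_pos hs]
        by_cases hr : (normB l).any PySem.Chars.isdigit = true
        · obtain ⟨hne, hiff⟩ := hrest hr
          have hml : normB l ≠ [] := by
            rcases List.any_eq_true.mp hr with ⟨x, hx, _⟩
            exact List.ne_nil_of_mem hx
          obtain ⟨d, hdl⟩ : ∃ d, (normB l).getLast? = some d := by
            cases h : (normB l).getLast? with
            | none => exact absurd (List.getLast?_eq_none_iff.mp h) hml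
            | some d => exact ⟨d, rfl⟩
          have hgetD : (normB l).getLastD ' ' = d := by
            rw [List.getLastD_eq_getLast?, hdl]; rfl
          by_cases hdot : d = '.'
          · -- ends with '.': A skips, B's neighbour test drops it
            have hlastK : (keepB (normB l)).getLast? = some '.' := hiff.mpr (by rw [hdl, hdot])
            have hguard : PySem.List.pyGet? (keepB (normB l)) (-1) = some '.' := by
              rw [pyGet_neg_one _ hne, hlastK]
            have hk : keepB (normB l ++ ['.']) = keepB (normB l) := by
              rw [keepB_snoc, hgetD, hdot]; simp [dot_not_digit]
            constructor
            · simp [List.foldl, stepA, hd, hguard, hk, List.any_append, hr, dot_not_digit]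
            · intro _
              rw [hk]
              refine ⟨hne, ?_⟩
              rw [List.getLast?_append_of_ne_nil _ (by simp)]
              exact ⟨fun _ => rfl, fun _ => hlastK⟩
          · -- ends with a digit: A appends '.', B's neighbour test keeps it
            have hddig : PySem.Chars.isdigit d = true := by
              rcases mem_normB l d (List.mem_of_getLast? hdl) with h | h
              · exact h
              · exact absurd h hdot
            have hlastK : (keepB (normB l)).getLast? ≠ some '.' := fun h =>
              hdot (by have := hiff.mp h; rw [hdl] at this; exact Option.some_inj.mp this)
            have hguard : (PySem.List.pyGet? (keepB (normB l)) (-1) != some '.') = true := by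
              rw [pyGet_neg_one _ hne]; simpa using hlastK
            have hk : keepB (normB l ++ ['.']) = keepB (normB l) ++ ['.'] := by
              rw [keepB_snoc, hgetD]; simp [hddig]
            constructor
            · simp [List.foldl, stepA, hd, hguard, hs, hk, List.any_append, hr, dot_not_digit]
            · intro _
              rw [hk]
              refine ⟨by simp, ?_⟩
              rw [List.getLast?_append_of_ne_nil _ (by simp),
                List.getLast?_append_of_ne_nil _ (by simp)]
        · -- no digit yet: A skips (reached false), B drops (no digit neighbour)
          have hps : ∀ x ∈ normB l, x = '.' := by
            intro x hx
            rcases mem_normB l x hx with h | h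
            · exact absurd (List.any_eq_true.mpr ⟨x, hx, h⟩) hr
            · exact h
          have hrB : (normB l).any PySem.Chars.isdigit = false := by
            cases h : (normB l).any PySem.Chars.isdigit
            · rfl
            · exact absurd h hr
          have hk : keepB (normB l ++ ['.']) = keepB (normB l) := by
            have hgl : PySem.Chars.isdigit ((normB l).getLast?.getD ' ') = false := by
              cases h : (normB l).getLast? with
              | none => decide
              | some d =>
                have hd' := hps d (List.mem_of_getLast? h)
                simp [hd', dot_not_digit]
            rw [keepB_snoc,
              if_neg (by simp [List.getLastD_eq_getLast?, hgl, dot_not_digit])]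
            simp
          have hr' : (normB l ++ ['.']).any PySem.Chars.isdigit = false := by
            simp only [List.any_append, hrB]
            decide
          constructor
          · simp [List.foldl, stepA, hd, hrB, hk, hr']
          · intro h; rw [hr'] at h; exact absurd h (by simp)
      · -- an ignored character: both sides unchanged
        rw [if_neg hd, if_neg hs, List.append_nil]
        refine ⟨?_, hrest⟩
        have hsF : (c == '-' || c == '.') = false := by
          cases h : (c == '-' || c == '.')
          · rfl
          · exact absurd h hs
        simp [List.foldl, stepA, hd, hsF]

-- ===== VERDICT (by name: the statement is the Claim_ definition above) =====
theorem rename_chapter_spec : Claim_equal_rename_chapter := by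
  intro chapter _
  unfold Spec_rename_chapter
  obtain ⟨hfold, _⟩ := invA_holds chapter.toList
  unfold rename_chapter rename_chapter_alt
  rw [hfold, normB_any_digit]
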